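-- pv_equiv track=rewrite | github.com/snji-khjuria/ecommerce-bot | table_filters.py | endsBeforeStart
-- ===== SOURCE A (Python) =====
-- def endsBeforeStart(s, intersected):
--     loc = 0
--     while True:
--         loc = s.find("<", loc)
--         if loc==-1:
--             return False
--         loc = loc+1
--         if s[loc:].startswith(intersected):
--             return False
--         if s[loc:].startswith("/"+intersected):
--             return True
-- ===== SOURCE B (Python) =====
-- def endsBeforeStart(s, intersected):
--     p_open = s.find("<" + intersected)
--     p_close = s.find("</" + intersected)
--     return p_close != -1 and (p_open == -1 or p_close < p_open)
-- ===== Notes on version B (the rewrite author's own statement) =====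
-- stated objective: simpler
-- what changed: Replaced the manual while-loop scan over every '<' with two direct substring searches (find of '<'+intersected and of '</'+intersected) and a single position comparison.
import Mathlib
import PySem

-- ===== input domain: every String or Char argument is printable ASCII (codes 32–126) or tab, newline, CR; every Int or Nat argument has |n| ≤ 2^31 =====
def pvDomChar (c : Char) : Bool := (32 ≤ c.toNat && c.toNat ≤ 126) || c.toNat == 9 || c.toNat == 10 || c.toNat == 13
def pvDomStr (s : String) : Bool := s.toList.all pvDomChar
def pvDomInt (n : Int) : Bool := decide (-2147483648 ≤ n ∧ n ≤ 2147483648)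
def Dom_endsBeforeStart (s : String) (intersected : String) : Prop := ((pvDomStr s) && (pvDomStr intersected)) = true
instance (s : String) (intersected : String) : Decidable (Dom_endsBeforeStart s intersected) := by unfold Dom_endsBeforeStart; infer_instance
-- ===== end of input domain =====

-- B replaces A's manual while-loop scan over each '<' by two direct substring
-- searches plus one position comparison (objective: simpler).

-- ===== PORT A =====

-- termination helper for A's loop: a successful findFrom on a nonempty pattern
-- lands at or after the start index and strictly inside the string
theorem pvFindFromBounds (t sub : List Char) (loc : Nat) (hsub : sub ≠ [])
    (h : PySem.Chars.findFrom t sub (loc : Int) none ≠ -1) :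
    loc ≤ (PySem.Chars.findFrom t sub (loc : Int) none).toNat ∧
    (PySem.Chars.findFrom t sub (loc : Int) none).toNat < t.length := by
  by_cases hk : loc ≤ t.length
  · rw [PySem.Chars.findFrom_natCast t sub loc hk] at h ⊢
    split_ifs at h ⊢ with hr
    · exact absurd rfl h
    · have h0 : 0 ≤ PySem.Chars.find (t.drop loc) sub := by
        have := PySem.Chars.neg_one_le_find (t.drop loc) sub
        omega
      obtain ⟨hpre, -⟩ := PySem.Chars.find_spec (s := t.drop loc) (sub := sub) h0
      rw [List.drop_drop] at hpre
      have hne : t.drop (loc + (PySem.Chars.find (t.drop loc) sub).toNat) ≠ [] := by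
        intro hnil; rw [hnil] at hpre
        exact hsub (List.prefix_nil.mp hpre)
      have hlt : loc + (PySem.Chars.find (t.drop loc) sub).toNat < t.length := by
        by_contra hge
        exact hne (List.drop_eq_nil_of_le (by omega))
      constructor <;> omega
  · exfalso
    apply h
    simp only [PySem.Chars.findFrom]
    split_ifs with h1 h2 <;> omega

-- the `while True` loop of A; state = loc, as in the Python
def endsBeforeStartLoop (t I : List Char) (loc : Nat) : Bool :=
  let f := PySem.Chars.findFrom t ['<'] (loc : Int) none
  if hf : f = -1 then false
  else
    let loc' := f.toNat + 1
    if PySem.Chars.startswith (t.drop loc') I then false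
    else if PySem.Chars.startswith (t.drop loc') ('/' :: I) then true
    else endsBeforeStartLoop t I loc'
termination_by t.length + 1 - loc
decreasing_by
  have := pvFindFromBounds t ['<'] loc (by simp) hf
  omega

def endsBeforeStart (s : String) (intersected : String) : Bool :=
  endsBeforeStartLoop s.toList intersected.toList 0

-- ===== PORT B =====
def endsBeforeStart_alt (s : String) (intersected : String) : Bool :=
  let pOpen := PySem.Str.find s ("<" ++ intersected)
  let pClose := PySem.Str.find s ("</" ++ intersected)
  (pClose != -1) && ((pOpen == -1) || decide (pClose < pOpen))

-- ===== PRECONDITION & SPEC =====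
def Spec_endsBeforeStart (s : String) (intersected : String) (out : Bool) : Prop := out = endsBeforeStart_alt s intersected
instance (s : String) (intersected : String) (out : Bool) : Decidable (Spec_endsBeforeStart s intersected out) := by unfold Spec_endsBeforeStart; infer_instance

-- ===== CLAIM (what is proved, stated in full; the proofs are below) =====
def Claim_equal_endsBeforeStart : Prop := ∀ (s : String) (intersected : String), Dom_endsBeforeStart s intersected → Spec_endsBeforeStart s intersected (endsBeforeStart s intersected)

-- ===== LEMMAS AND PROOFS =====

-- find returns k when sub occurs at k and nowhere earlier
theorem pvFindEq (t sub : List Char) (k : Nat) (hpre : sub <+: t.drop k)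
    (hmin : ∀ j, j < k → ¬ sub <+: t.drop j) : PySem.Chars.find t sub = (k : Int) := by
  have hinf : sub <:+: t := hpre.isInfix.trans (t.drop_suffix k).isInfix
  have h0 : 0 ≤ PySem.Chars.find t sub := (PySem.Chars.find_nonneg_iff t sub).mpr hinf
  obtain ⟨hp2, hmin2⟩ := PySem.Chars.find_spec (s := t) (sub := sub) h0
  have : (PySem.Chars.find t sub).toNat = k := by
    rcases Nat.lt_trichotomy (PySem.Chars.find t sub).toNat k with h | h | h
    · exact absurd hp2 (hmin _ h)
    · exact h
    · exact absurd hpre (hmin2 _ h)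
  omega

-- find = -1 when sub is a prefix of no suffix
theorem pvFindNone (t sub : List Char) (h : ∀ j, ¬ sub <+: t.drop j) :
    PySem.Chars.find t sub = -1 := by
  rw [PySem.Chars.find_eq_neg_one_iff]
  intro hinf
  have : PySem.Chars.isIn sub t = true := (PySem.Chars.isIn_iff_infix sub t).mpr hinf
  obtain ⟨j, hj⟩ := (PySem.Chars.exists_prefix_drop_iff_isIn sub t).mpr this
  exact h j hj

theorem pvDropCons (t : List Char) (p : Nat) (hpre : ['<'] <+: t.drop p) :
    t.drop p = '<' :: t.drop (p+1) := by
  obtain ⟨u, hu⟩ := hpre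
  have ht : (t.drop p).tail = t.drop (p+1) := List.tail_drop
  rw [← hu] at ht ⊢
  simp at ht
  simp [ht]

-- main loop invariant: once no occurrence of either tag starts before loc,
-- the loop computes B's find-and-compare formula
theorem pvLoopEq (t I : List Char) (loc : Nat) (hk : loc ≤ t.length)
    (hO : ∀ j, j < loc → ¬ ('<' :: I) <+: t.drop j)
    (hC : ∀ j, j < loc → ¬ ('<' :: '/' :: I) <+: t.drop j) :
    endsBeforeStartLoop t I loc =
      ((PySem.Chars.find t ('<' :: '/' :: I) != -1) &&
       ((PySem.Chars.find t ('<' :: I) == -1) ||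
        decide (PySem.Chars.find t ('<' :: '/' :: I) < PySem.Chars.find t ('<' :: I)))) := by
  rw [endsBeforeStartLoop]
  simp only
  rw [PySem.Chars.findFrom_natCast t ['<'] loc hk]
  by_cases hr : PySem.Chars.find (t.drop loc) ['<'] = -1
  · -- no '<' from loc on: neither pattern occurs anywhere
    simp only [hr, if_pos, dite_eq_ite]
    have hnoLt : ∀ j, loc ≤ j → ¬ (['<'] : List Char) <+: t.drop j := by
      intro j hj hpre
      rw [show j = loc + (j - loc) by omega, ← List.drop_drop] at hpre
      rw [PySem.Chars.find_eq_neg_one_iff] at hr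
      apply hr
      rw [← PySem.Chars.isIn_iff_infix]
      exact (PySem.Chars.exists_prefix_drop_iff_isIn _ _).mp ⟨_, hpre⟩
    have hO' : PySem.Chars.find t ('<' :: I) = -1 := by
      apply pvFindNone
      intro j hpre
      by_cases hj : j < loc
      · exact hO j hj hpre
      · exact hnoLt j (by omega) (List.IsPrefix.trans ⟨I, rfl⟩ hpre)
    have hC' : PySem.Chars.find t ('<' :: '/' :: I) = -1 := by
      apply pvFindNone
      intro j hpre
      by_cases hj : j < loc
      · exact hC j hj hpre
      · exact hnoLt j (by omega) (List.IsPrefix.trans ⟨'/' :: I, rfl⟩ hpre)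
    simp [hO', hC']
  · -- a '<' is found at p = loc + r
    have h0 : 0 ≤ PySem.Chars.find (t.drop loc) ['<'] := by
      have := PySem.Chars.neg_one_le_find (t.drop loc) ['<']
      omega
    obtain ⟨hpreP, hminP⟩ := PySem.Chars.find_spec (s := t.drop loc) (sub := ['<']) h0
    rw [List.drop_drop] at hpreP
    set r := PySem.Chars.find (t.drop loc) ['<'] with hrdef
    set p := loc + r.toNat with hpdef
    have hfne : ¬ ((loc : Int) + r = -1) := by omega
    have htn : ((loc : Int) + r).toNat = p := by omega
    simp only [hr, if_false, dite_eq_ite, hfne, htn]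
    have hnoLt : ∀ j, loc ≤ j → j < p → ¬ (['<'] : List Char) <+: t.drop j := by
      intro j hj1 hj2 hpre
      apply hminP (j - loc) (by omega)
      rw [List.drop_drop, show loc + (j - loc) = j by omega]
      exact hpre
    have hnoO : ∀ j, j < p → ¬ ('<' :: I) <+: t.drop j := by
      intro j hj hpre
      by_cases hjl : j < loc
      · exact hO j hjl hpre
      · exact hnoLt j (by omega) hj (List.IsPrefix.trans ⟨I, rfl⟩ hpre)
    have hnoC : ∀ j, j < p → ¬ ('<' :: '/' :: I) <+: t.drop j := by
      intro j hj hpre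
      by_cases hjl : j < loc
      · exact hC j hjl hpre
      · exact hnoLt j (by omega) hj (List.IsPrefix.trans ⟨'/' :: I, rfl⟩ hpre)
    have hdrop : t.drop p = '<' :: t.drop (p+1) := pvDropCons t p hpreP
    have hplen : p < t.length := by
      by_contra hge
      have : t.drop p = [] := List.drop_eq_nil_of_le (by omega)
      rw [this] at hdrop
      exact List.cons_ne_nil _ _ hdrop.symm
    have hOiff : ('<' :: I) <+: t.drop p ↔ I <+: t.drop (p+1) := by
      rw [hdrop, List.cons_prefix_cons]
      simp
    have hCiff : ('<' :: '/' :: I) <+: t.drop p ↔ ('/' :: I) <+: t.drop (p+1) := by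
      rw [hdrop, List.cons_prefix_cons]
      simp
    by_cases hs1 : PySem.Chars.startswith (t.drop (p+1)) I = true
    · -- open tag found first: both sides false
      have hOp : PySem.Chars.find t ('<' :: I) = (p : Int) :=
        pvFindEq t _ p (hOiff.mpr ((PySem.Chars.startswith_iff _ _).mp hs1)) hnoO
      simp only [hs1, if_true]
      by_cases hc : PySem.Chars.find t ('<' :: '/' :: I) = -1
      · simp [hc]
      · have hc0 : 0 ≤ PySem.Chars.find t ('<' :: '/' :: I) := by
          have := PySem.Chars.neg_one_le_find t ('<' :: '/' :: I)
          omega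
        obtain ⟨hcp, -⟩ := PySem.Chars.find_spec (s := t) (sub := '<' :: '/' :: I) hc0
        have hge : p ≤ (PySem.Chars.find t ('<' :: '/' :: I)).toNat := by
          by_contra hlt
          exact hnoC _ (by omega) hcp
        have e1 : (PySem.Chars.find t ('<' :: I) == (-1 : Int)) = false := by
          simp [hOp]; try omega
        have e2 : decide (PySem.Chars.find t ('<' :: '/' :: I) < PySem.Chars.find t ('<' :: I)) = false := by
          simp [hOp]; try omega
        simp [e1, e2]
    · by_cases hs2 : PySem.Chars.startswith (t.drop (p+1)) ('/' :: I) = true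
      · -- closing tag found first: both sides true
        have hCl : PySem.Chars.find t ('<' :: '/' :: I) = (p : Int) :=
          pvFindEq t _ p (hCiff.mpr ((PySem.Chars.startswith_iff _ _).mp hs2)) hnoC
        simp only [hs1, hs2, if_true]
        have hnoOp : ¬ ('<' :: I) <+: t.drop p := fun hpre =>
          hs1 ((PySem.Chars.startswith_iff _ _).mpr (hOiff.mp hpre))
        have e1 : (PySem.Chars.find t ('<' :: '/' :: I) != (-1 : Int)) = true := by
          simp [hCl]; try omega
        by_cases ho : PySem.Chars.find t ('<' :: I) = -1
        · simp [e1, ho]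
        · have ho0 : 0 ≤ PySem.Chars.find t ('<' :: I) := by
            have := PySem.Chars.neg_one_le_find t ('<' :: I)
            omega
          obtain ⟨hop, -⟩ := PySem.Chars.find_spec (s := t) (sub := '<' :: I) ho0
          have hgt : p < (PySem.Chars.find t ('<' :: I)).toNat := by
            rcases Nat.lt_trichotomy (PySem.Chars.find t ('<' :: I)).toNat p with h | h | h
            · exact absurd hop (hnoO _ h)
            · rw [h] at hop; exact absurd hop hnoOp
            · exact h
          have e2 : decide (PySem.Chars.find t ('<' :: '/' :: I) < PySem.Chars.find t ('<' :: I)) = true := by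
            simp [hCl]; try omega
          simp [e1, e2]
      · -- neither tag at this '<': continue scanning
        simp only [hs1, hs2]
        apply pvLoopEq t I (p+1) (by omega)
        · intro j hj hpre
          rcases Nat.lt_or_ge j p with h | h
          · exact hnoO j h hpre
          · have : j = p := by omega
            subst this
            exact hs1 ((PySem.Chars.startswith_iff _ _).mpr (hOiff.mp hpre))
        · intro j hj hpre
          rcases Nat.lt_or_ge j p with h | h
          · exact hnoC j h hpre
          · have : j = p := by omega
            subst this
            exact hs2 ((PySem.Chars.startswith_iff _ _).mpr (hCiff.mp hpre))
termination_by t.length + 1 - loc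
decreasing_by omega

-- ===== VERDICT (by name: the statement is the Claim_ definition above) =====
theorem endsBeforeStart_spec : Claim_equal_endsBeforeStart := by
  intro s intersected _
  unfold Spec_endsBeforeStart endsBeforeStart endsBeforeStart_alt
  rw [pvLoopEq s.toList intersected.toList 0 (by omega) (by omega) (by omega)]
  simp [PySem.Str.find_eq]
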